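-- pv_equiv track=rewrite | github.com/vitaldb/openecg | scripts/viz_butpdb_avb.py | frames_to_bands
-- ===== SOURCE A (Python) =====
-- FS = 250
--
-- FRAME_MS = 20
--
-- CMAP = {1: ("red", "P"), 2: ("blue", "QRS"), 3: ("green", "T")}
--
-- def frames_to_bands(frames, n_samples, frame_ms=FRAME_MS):
--     spf = int(round(frame_ms * FS / 1000))
--     bands = []
--     cur_cls = None
--     cur_lo = 0
--     for fi, c in enumerate(frames):
--         c = int(c)
--         if c != cur_cls:
--             if cur_cls in CMAP:
--                 bands.append((cur_lo, fi * spf, cur_cls))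
--             cur_cls = c
--             cur_lo = fi * spf
--     if cur_cls in CMAP:
--         bands.append((cur_lo, n_samples, cur_cls))
--     return bands
-- ===== SOURCE B (Python) =====
-- FS = 250
--
-- FRAME_MS = 20
--
-- CMAP = {1: ("red", "P"), 2: ("blue", "QRS"), 3: ("green", "T")}
--
-- def frames_to_bands(frames, n_samples, frame_ms=FRAME_MS):
--     spf = int(round(frame_ms * FS / 1000))
--     xs = [int(c) for c in frames]
--     n = len(xs)
--     # stage 1: indices where a new run of equal classes begins, plus the end sentinel n
--     cuts = [i for i in range(n) if i == 0 or xs[i] != xs[i - 1]] + [n]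
--     # stage 2: each consecutive pair of cut points is a band; keep only CMAP classes
--     return [(cuts[k] * spf,
--              n_samples if cuts[k + 1] == n else cuts[k + 1] * spf,
--              xs[cuts[k]])
--             for k in range(len(cuts) - 1)
--             if xs[cuts[k]] in CMAP]
-- ===== Notes on version B (the rewrite author's own statement) =====
-- stated objective: alternative
-- what changed: Replaces A's stateful change-detection scan (cur_cls/cur_lo carried across the loop, bands emitted one change late plus a final flush) with two staged passes: first a comprehension collecting the change-point indices plus an end sentinel, then a comprehension over consecutive cut pairs that maps each pair directly to a band.
import Mathlib
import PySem

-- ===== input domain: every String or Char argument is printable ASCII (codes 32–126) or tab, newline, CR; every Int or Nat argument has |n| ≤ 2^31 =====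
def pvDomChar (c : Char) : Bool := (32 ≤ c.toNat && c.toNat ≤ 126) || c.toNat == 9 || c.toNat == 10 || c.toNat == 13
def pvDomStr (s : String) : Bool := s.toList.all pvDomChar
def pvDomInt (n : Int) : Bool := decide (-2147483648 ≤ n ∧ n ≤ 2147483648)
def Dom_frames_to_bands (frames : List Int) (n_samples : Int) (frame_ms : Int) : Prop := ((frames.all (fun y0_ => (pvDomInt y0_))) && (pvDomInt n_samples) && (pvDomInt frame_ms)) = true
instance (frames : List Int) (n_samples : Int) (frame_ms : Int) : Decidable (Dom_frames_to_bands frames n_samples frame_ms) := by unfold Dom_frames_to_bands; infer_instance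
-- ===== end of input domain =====

-- B replaces A's stateful change-detection scan (current class and band start carried across the
-- loop, bands emitted one change late plus a final flush) by two staged passes: first collect the
-- change-point indices plus an end sentinel, then map consecutive pairs of cut points to bands;
-- objective: alternative decomposition, same cost.

-- ===== PORT A =====

-- spf = int(round(frame_ms * 250 / 1000)): mathematically frame_ms / 4; for |frame_ms| ≤ 2^31 the
-- float computation is exact (quarters are exactly representable), so this equals round-half-to-even
-- of frame_ms / 4, written here in exact integer arithmetic.
def pySpf (frame_ms : Int) : Int :=
  let f := PySem.Int.floordiv frame_ms 4
  let r := PySem.Int.mod frame_ms 4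
  if r = 1 then f
  else if r = 3 then f + 1
  else if r = 2 then (if f % 2 = 0 then f else f + 1)
  else f

-- 'cur_cls in CMAP' (cur_cls is None or an int; CMAP's keys are 1, 2, 3)
def cmapO : Option Int → Bool
  | some c => c == 1 || c == 2 || c == 3
  | none => false

-- the 'for fi, c in enumerate(frames)' loop over the state (bands, cur_cls, cur_lo); fi from enumerate
def loopA (spf : Int) : List Int → Nat → (List (Int × Int × Int) × Option Int × Int) → (List (Int × Int × Int) × Option Int × Int)
  | [], _, st => st
  | c :: rest, fi, (bands, cur, lo) =>
    if some c ≠ cur then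
      loopA spf rest (fi + 1)
        ((if cmapO cur then bands ++ [(lo, (fi : Int) * spf, cur.getD 0)] else bands), some c, (fi : Int) * spf)
    else
      loopA spf rest (fi + 1) (bands, cur, lo)

def frames_to_bands (frames : List Int) (n_samples : Int) (frame_ms : Int) : List (Int × Int × Int) :=
  let spf := pySpf frame_ms
  let st := loopA spf frames 0 ([], none, 0)
  if cmapO st.2.1 then st.1 ++ [(st.2.2, n_samples, st.2.1.getD 0)] else st.1

-- ===== PORT B =====

-- 'c in CMAP' for an int c
def cmapI (c : Int) : Bool := c == 1 || c == 2 || c == 3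

-- 'i == 0 or xs[i] != xs[i - 1]'; the indices i and i - 1 are nonnegative and in range whenever
-- xs[i - 1] is read (i ≥ 1), so plain getD is exact here
def cutPred (xs : List Int) (i : Nat) : Bool :=
  i == 0 || !(xs.getD i 0 == xs.getD (i - 1) 0)

-- 'cuts = [i for i in range(n) if i == 0 or xs[i] != xs[i - 1]] + [n]'
def cutsB (xs : List Int) : List Nat :=
  (List.range xs.length).filter (cutPred xs) ++ [xs.length]

-- the final comprehension over k in range(len(cuts) - 1); cuts[k] and cuts[k + 1] are always in
-- range and xs[cuts[k]] is in range (cut points other than the sentinel are < n), so getD is exact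
def frames_to_bands_alt (frames : List Int) (n_samples : Int) (frame_ms : Int) : List (Int × Int × Int) :=
  let spf := pySpf frame_ms
  let xs := frames.map (fun c => c)  -- int(c) is the identity on int inputs
  let n := xs.length
  let cs := cutsB xs
  (List.range (cs.length - 1)).filterMap (fun k =>
    let lo := cs.getD k 0
    let hi := cs.getD (k + 1) 0
    let c := xs.getD lo 0
    if cmapI c then some ((lo : Int) * spf, (if hi = n then n_samples else (hi : Int) * spf), c)
    else none)

-- ===== PRECONDITION & SPEC =====
def Spec_frames_to_bands (frames : List Int) (n_samples : Int) (frame_ms : Int) (out : List (Int × Int × Int)) : Prop := out = frames_to_bands_alt frames n_samples frame_ms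
instance (frames : List Int) (n_samples : Int) (frame_ms : Int) (out : List (Int × Int × Int)) : Decidable (Spec_frames_to_bands frames n_samples frame_ms out) := by unfold Spec_frames_to_bands; infer_instance

-- ===== CLAIM (what is proved, stated in full; the proofs are below) =====
def Claim_equal_frames_to_bands : Prop := ∀ (frames : List Int) (n_samples : Int) (frame_ms : Int), Dom_frames_to_bands frames n_samples frame_ms → Spec_frames_to_bands frames n_samples frame_ms (frames_to_bands frames n_samples frame_ms)

-- ===== LEMMAS AND PROOFS =====

-- canonical form: bands of the suffix xs (first index fi), current class c with band start lo
def bandsC (spf ns : Int) : List Int → Nat → Int → Int → List (Int × Int × Int)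
  | [], _, c, lo => if cmapI c then [(lo, ns, c)] else []
  | x :: rest, fi, c, lo =>
    if x = c then bandsC spf ns rest (fi + 1) c lo
    else (if cmapI c then [(lo, (fi : Int) * spf, c)] else []) ++ bandsC spf ns rest (fi + 1) x ((fi : Int) * spf)

theorem cmapO_some (c : Int) : cmapO (some c) = cmapI c := rfl

-- A's loop + final flush computes bandsC
theorem loopA_eq (spf ns : Int) (xs : List Int) :
    ∀ (fi : Nat) (bands : List (Int × Int × Int)) (c lo : Int),
    (let st := loopA spf xs fi (bands, some c, lo);
     if cmapO st.2.1 then st.1 ++ [(st.2.2, ns, st.2.1.getD 0)] else st.1)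
      = bands ++ bandsC spf ns xs fi c lo := by
  induction xs with
  | nil =>
    intro fi bands c lo
    simp [loopA, bandsC, cmapO_some]
    by_cases h : cmapI c <;> simp [h]
  | cons x rest ih =>
    intro fi bands c lo
    by_cases hxc : x = c
    · simp [loopA, hxc, bandsC, ih]
    · simp only [loopA, bandsC, if_neg hxc, if_pos (by simpa using hxc : some x ≠ some c)]
      rw [ih]
      by_cases h : cmapI c <;> simp [h, cmapO_some, List.append_assoc]

-- one band from a pair of cut points
def bandOf (spf ns : Int) (n : Nat) (xs : List Int) (a b : Nat) : Option (Int × Int × Int) :=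
  if cmapI (xs.getD a 0) then
    some ((a : Int) * spf, (if b = n then ns else (b : Int) * spf), xs.getD a 0)
  else none

-- structural walk over consecutive pairs of a cut list
def walkC (spf ns : Int) (n : Nat) (xs : List Int) : List Nat → List (Int × Int × Int)
  | a :: b :: rest => (bandOf spf ns n xs a b).toList ++ walkC spf ns n xs (b :: rest)
  | _ => []

-- the index comprehension over consecutive pairs equals the structural walk
theorem filterMap_pairs {α : Type} (g : Nat → Nat → Option α) (a b : Nat) (rest : List Nat) :
    (List.range ((a :: b :: rest).length - 1)).filterMap
        (fun k => g ((a :: b :: rest).getD k 0) ((a :: b :: rest).getD (k + 1) 0))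
      = (g a b).toList ++
          (List.range ((b :: rest).length - 1)).filterMap
            (fun k => g ((b :: rest).getD k 0) ((b :: rest).getD (k + 1) 0)) := by
  simp only [List.length_cons, Nat.add_sub_cancel, List.range_succ_eq_map,
    List.filterMap_cons, List.filterMap_map]
  cases h : g a b <;> simp [h, Function.comp]

theorem filterMap_eq_walkC (spf ns : Int) (n : Nat) (xs : List Int) (cs : List Nat) :
    (List.range (cs.length - 1)).filterMap
        (fun k => bandOf spf ns n xs (cs.getD k 0) (cs.getD (k + 1) 0))
      = walkC spf ns n xs cs := by
  match cs with
  | [] => simp [walkC]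
  | [a] => simp [walkC]
  | a :: b :: rest =>
    rw [filterMap_pairs (bandOf spf ns n xs) a b rest,
      filterMap_eq_walkC spf ns n xs (b :: rest)]
    rfl

-- run-start indices of the suffix ys of xs beginning at index a, with prev the class at a - 1
def startsAux (prev : Int) : List Int → Nat → List Nat
  | [], _ => []
  | y :: rest, a => (if y = prev then [] else [a]) ++ startsAux y rest (a + 1)

-- the filtered index range computes startsAux
theorem filter_range'_eq_startsAux (xs : List Int) :
    ∀ (ys : List Int) (a : Nat), 1 ≤ a → xs.drop a = ys → a + ys.length = xs.length →
    (List.range' a ys.length).filter (cutPred xs) = startsAux (xs.getD (a - 1) 0) ys a := by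
  intro ys
  induction ys with
  | nil => intro a _ _ _; simp [startsAux]
  | cons y rest ih =>
    intro a ha hdrop hlen
    have halt : a < xs.length := by simp at hlen; omega
    have hy : xs.getD a 0 = y := by
      rw [List.getD_eq_getElem?_getD, ← Nat.add_zero a, ← List.getElem?_drop, hdrop]
      rfl
    have hrest : xs.drop (a + 1) = rest := by
      rw [← List.tail_drop, hdrop]
      rfl
    have hne0 : a ≠ 0 := by omega
    have hb : (y == xs.getD (a - 1) 0) = decide (y = xs.getD (a - 1) 0) := by
      by_cases h : y = xs.getD (a - 1) 0
      · rw [decide_eq_true h, h]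
        simp
      · rw [decide_eq_false h]
        exact beq_eq_false_iff_ne.mpr h
    have hcut : cutPred xs a = !(decide (y = xs.getD (a - 1) 0)) := by
      unfold cutPred
      rw [hy, hb, beq_eq_false_iff_ne.mpr hne0, Bool.false_or]
    have hlen' : a + 1 + rest.length = xs.length := by
      simp only [List.length_cons] at hlen; omega
    rw [List.length_cons, List.range'_succ, List.filter_cons, hcut,
      ih (a + 1) (by omega) hrest hlen']
    have hgd : xs.getD (a + 1 - 1) 0 = y := by simpa using hy
    rw [hgd]
    simp only [startsAux]
    by_cases h : y = xs.getD (a - 1) 0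
    · rw [if_neg (by rw [decide_eq_true h]; simp : ¬((!decide (y = xs.getD (a - 1) 0)) = true)),
        if_pos h, List.nil_append]
    · rw [if_pos (by rw [decide_eq_false h]; simp : (!decide (y = xs.getD (a - 1) 0)) = true),
        if_neg h, List.singleton_append]

-- walking the cut list (s :: startsAux c ys a ++ [n]) computes bandsC
theorem walkC_eq_bandsC (spf ns : Int) (xs : List Int) :
    ∀ (ys : List Int) (a : Nat) (c : Int) (s : Nat),
    xs.drop a = ys → xs.getD s 0 = c → a + ys.length = xs.length →
    walkC spf ns xs.length xs (s :: (startsAux c ys a ++ [xs.length]))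
      = bandsC spf ns ys a c ((s : Int) * spf) := by
  intro ys
  induction ys with
  | nil =>
    intro a c s _ hs hlen
    simp only [startsAux, List.nil_append, walkC, bandOf, hs]
    simp [bandsC]
    by_cases h : cmapI c <;> simp [h]
  | cons y rest ih =>
    intro a c s hdrop hs hlen
    have halt : a < xs.length := by simp at hlen; omega
    have hy : xs.getD a 0 = y := by
      rw [List.getD_eq_getElem?_getD, ← Nat.add_zero a, ← List.getElem?_drop, hdrop]
      rfl
    have hrest : xs.drop (a + 1) = rest := by
      rw [← List.tail_drop, hdrop]
      rfl
    by_cases hyc : y = c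
    · simp only [startsAux, List.nil_append, bandsC, if_pos hyc]
      have hlen' : a + 1 + rest.length = xs.length := by
        simp only [List.length_cons] at hlen; omega
      rw [hyc] at *
      exact ih (a + 1) c s hrest hs hlen'
    · simp only [startsAux, List.cons_append, bandsC, if_neg hyc]
      have hlen' : a + 1 + rest.length = xs.length := by
        simp only [List.length_cons] at hlen; omega
      simp only [List.nil_append, walkC, bandOf, hs]
      rw [ih (a + 1) y a hrest hy hlen']
      have hne : a ≠ xs.length := by omega
      by_cases h : cmapI c <;> simp [h, hne]

-- B's two comprehensions compute bandsC
theorem alt_eq_bandsC (frames : List Int) (n_samples frame_ms : Int) :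
    frames_to_bands_alt frames n_samples frame_ms
      = (match frames with
         | [] => []
         | c :: rest => bandsC (pySpf frame_ms) n_samples rest 1 c ((0 : Int) * pySpf frame_ms)) := by
  have hmap : frames.map (fun c => c) = frames := by simp
  have hw : frames_to_bands_alt frames n_samples frame_ms
      = walkC (pySpf frame_ms) n_samples frames.length frames (cutsB frames) := by
    simp only [frames_to_bands_alt, hmap]
    rw [← filterMap_eq_walkC]
    rfl
  rw [hw]
  match frames with
  | [] => simp [cutsB, walkC]
  | c :: rest =>
    have h0 : cutsB (c :: rest) = 0 :: (startsAux c rest 1 ++ [(c :: rest).length]) := by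
      simp only [cutsB, List.length_cons]
      rw [show List.range (rest.length + 1) = 0 :: List.range' 1 rest.length by
        rw [List.range_eq_range', List.range'_succ]]
      rw [List.filter_cons]
      have : cutPred (c :: rest) 0 = true := by simp [cutPred]
      rw [this]
      rw [filter_range'_eq_startsAux (c :: rest) rest 1 (by omega) (by simp)
        (by simp only [List.length_cons]; omega)]
      simp
    rw [h0, walkC_eq_bandsC (pySpf frame_ms) n_samples (c :: rest) rest 1 c 0 (by simp)
      rfl (by simp only [List.length_cons]; omega)]
    simp

theorem frames_to_bands_eq_alt (frames : List Int) (n_samples frame_ms : Int) :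
    frames_to_bands frames n_samples frame_ms = frames_to_bands_alt frames n_samples frame_ms := by
  rw [alt_eq_bandsC]
  cases frames with
  | nil => simp [frames_to_bands, loopA, cmapO]
  | cons c rest =>
    simp only [frames_to_bands]
    rw [show loopA (pySpf frame_ms) (c :: rest) 0 ([], none, 0)
          = loopA (pySpf frame_ms) rest 1 ([], some c, (0 : Int) * pySpf frame_ms) by
        simp [loopA, cmapO]]
    rw [loopA_eq (pySpf frame_ms) n_samples rest 1 [] c ((0 : Int) * pySpf frame_ms)]
    simp

-- ===== VERDICT (by name: the statement is the Claim_ definition above) =====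
theorem frames_to_bands_spec : Claim_equal_frames_to_bands := by
  intro frames n_samples frame_ms _
  unfold Spec_frames_to_bands
  exact frames_to_bands_eq_alt frames n_samples frame_ms
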